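-- pv_equiv track=rewrite | github.com/itsmemdtofik/Python | SlidingWindow/FixedSizeWindow/SumOfAllSubarraysOfSizeK.py | sumOfAllSubarray
-- ===== SOURCE A (Python) =====
-- def sumOfAllSubarray(nums: int, window: int):
--     result = []
--
--     for i in range(len(nums) - window + 1):
--         currentSum = 0
--         for j in range(i, i + window):
--             currentSum += nums[j]
--         result.append(currentSum)
--
--     return result
-- ===== SOURCE B (Python) =====
-- def sumOfAllSubarray(nums, window):
--     n = len(nums)
--     if window < 0 or window > n:
--         return []
--     s = sum(nums[:window])
--     result = [s]
--     for i in range(window, n):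
--         s += nums[i] - nums[i - window]
--         result.append(s)
--     return result
-- ===== Notes on version B (the rewrite author's own statement) =====
-- stated objective: faster
-- what changed: Replaced the O(n*k) nested loop (re-summing each length-k window from scratch) by a single-pass sliding window that keeps a running sum, adding the entering element and subtracting the leaving one.
-- intended difference: For negative window sizes A returns a list of n-window+1 zeros (an artefact of its empty inner range), while B returns [], the intended answer since no subarray has negative length. — e.g. on sumOfAllSubarray([1], -1): A returns [0, 0, 0], B returns []
import Mathlib
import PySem

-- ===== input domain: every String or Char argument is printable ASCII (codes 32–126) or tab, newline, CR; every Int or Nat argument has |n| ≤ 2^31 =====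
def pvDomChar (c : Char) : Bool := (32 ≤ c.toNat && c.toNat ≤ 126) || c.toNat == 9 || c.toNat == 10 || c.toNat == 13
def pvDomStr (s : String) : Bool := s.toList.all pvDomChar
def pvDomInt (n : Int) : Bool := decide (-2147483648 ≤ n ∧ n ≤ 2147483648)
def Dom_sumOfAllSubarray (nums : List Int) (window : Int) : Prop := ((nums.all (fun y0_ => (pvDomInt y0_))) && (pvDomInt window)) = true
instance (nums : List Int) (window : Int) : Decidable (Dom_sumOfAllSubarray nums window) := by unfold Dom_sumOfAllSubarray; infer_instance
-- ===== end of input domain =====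

-- B replaces A's O(n*k) re-summing of every window by a one-pass sliding window with a running sum (asymptotically faster); on negative window sizes A returns a list of zeros, B returns [] (see D_).


-- ===== PORT A =====
-- literal port of A: for each start i, an inner loop re-sums nums[i..i+window)
def sumOfAllSubarray (nums : List Int) (window : Int) : List Int :=
  (PySem.List.pyRange 0 ((nums.length : Int) - window + 1) 1).foldl
    (fun result i =>
      result ++ [(PySem.List.pyRange i (i + window) 1).foldl
        (fun currentSum j => currentSum + PySem.List.pyGetD nums j 0) 0])
    []

-- ===== PORT B =====
-- literal port of B (Source B): running sum, add the entering element, subtract the leaving one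
def sumOfAllSubarray_alt (nums : List Int) (window : Int) : List Int :=
  let n : Int := nums.length
  if window < 0 ∨ n < window then []
  else
    let s0 : Int := (PySem.List.slice nums none (some window)).sum
    ((PySem.List.pyRange window n 1).foldl
      (fun (st : Int × List Int) i =>
        let s := st.1 + PySem.List.pyGetD nums i 0 - PySem.List.pyGetD nums (i - window) 0
        (s, st.2 ++ [s]))
      (s0, [s0])).2

-- ===== PRECONDITION & SPEC =====
-- For window < 0, A returns a list of nums.length - window + 1 zeros (an artefact of its empty
-- inner range), while B returns []: no subarray has negative length, so [] is the intended value.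
def D_sumOfAllSubarray (nums : List Int) (window : Int) : Prop := window < 0
instance (nums : List Int) (window : Int) : Decidable (D_sumOfAllSubarray nums window) := by unfold D_sumOfAllSubarray; infer_instance

def Spec_sumOfAllSubarray (nums : List Int) (window : Int) (out : List Int) : Prop :=
  ¬ D_sumOfAllSubarray nums window → out = sumOfAllSubarray_alt nums window
instance (nums : List Int) (window : Int) (out : List Int) : Decidable (Spec_sumOfAllSubarray nums window out) := by unfold Spec_sumOfAllSubarray; infer_instance

def pvDiffWitness_sumOfAllSubarray : List Int × Int := ([1], -1)
def pvDiffWitnessOut_sumOfAllSubarray : (List Int) × (List Int) := ([0, 0, 0], [])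

-- ===== CLAIM (what is proved, stated in full; the proofs are below) =====
def Claim_unchanged_sumOfAllSubarray : Prop := ∀ (nums : List Int) (window : Int), Dom_sumOfAllSubarray nums window → Spec_sumOfAllSubarray nums window (sumOfAllSubarray nums window)
def Claim_changed_sumOfAllSubarray : Prop := Dom_sumOfAllSubarray (pvDiffWitness_sumOfAllSubarray.1) (pvDiffWitness_sumOfAllSubarray.2) ∧ D_sumOfAllSubarray (pvDiffWitness_sumOfAllSubarray.1) (pvDiffWitness_sumOfAllSubarray.2) ∧ sumOfAllSubarray (pvDiffWitness_sumOfAllSubarray.1) (pvDiffWitness_sumOfAllSubarray.2) = pvDiffWitnessOut_sumOfAllSubarray.1 ∧ sumOfAllSubarray_alt (pvDiffWitness_sumOfAllSubarray.1) (pvDiffWitness_sumOfAllSubarray.2) = pvDiffWitnessOut_sumOfAllSubarray.2 ∧ pvDiffWitnessOut_sumOfAllSubarray.1 ≠ pvDiffWitnessOut_sumOfAllSubarray.2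
def Claim_exact_sumOfAllSubarray : Prop := ∀ (nums : List Int) (window : Int), Dom_sumOfAllSubarray nums window → D_sumOfAllSubarray nums window → sumOfAllSubarray nums window ≠ sumOfAllSubarray_alt nums window

-- ===== LEMMAS AND PROOFS =====

-- pvG nums j = nums[j] (default 0); pvF nums k t = sum of the window of length k starting at t
def pvG (nums : List Int) (j : Nat) : Int := nums.getD j 0
def pvF (nums : List Int) (k t : Nat) : Int := ∑ i ∈ Finset.range k, pvG nums (t + i)

-- sliding-window identity: shifting the window by one adds the entering and drops the leaving element
theorem pvF_slide (nums : List Int) (k t : Nat) :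
    pvF nums k (t + 1) = pvF nums k t + pvG nums (t + k) - pvG nums t := by
  cases k with
  | zero => simp [pvF]
  | succ m =>
    unfold pvF
    rw [Finset.sum_range_succ' (fun i => pvG nums (t + i)), Finset.sum_range_succ]
    have h : ∀ i, t + 1 + i = t + (i + 1) := by intro i; omega
    simp only [h]
    ring_nf

-- A's inner loop computes the window sum pvF
theorem inner_eq (nums : List Int) (k t : Nat) :
    (PySem.List.pyRange (t : Int) ((t : Int) + (k : Int)) 1).foldl
        (fun currentSum j => currentSum + PySem.List.pyGetD nums j 0) 0 = pvF nums k t := by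
  rw [PySem.List.pyRange_one]
  have hlen : (((t : Int) + (k : Int)) - (t : Int)).toNat = k := by omega
  rw [hlen, List.foldl_map]
  clear hlen
  induction k with
  | zero => simp [pvF]
  | succ m ih =>
    rw [List.range_succ, List.foldl_append, ih]
    simp only [List.foldl_cons, List.foldl_nil, pvF, Finset.sum_range_succ]
    have h : (t : Int) + (m : Int) = ((t + m : Nat) : Int) := by omega
    rw [h, PySem.List.pyGetD_natCast]
    rfl

theorem A_eq_map (nums : List Int) (k : Nat) (hk : k ≤ nums.length) :
    sumOfAllSubarray nums (k : Int) =
      (List.range (nums.length - k + 1)).map (fun t => pvF nums k t) := by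
  unfold sumOfAllSubarray
  rw [PySem.List.foldl_append_singleton_eq_map]
  have h1 : ((nums.length : Int) - (k : Int) + 1) = ((nums.length - k + 1 : Nat) : Int) := by omega
  rw [h1, PySem.List.pyRange_one]
  simp only [Int.sub_zero, Int.toNat_natCast, List.map_map]
  apply List.map_congr_left
  intro t ht
  simp only [Function.comp_apply, Int.zero_add]
  exact inner_eq nums k t

theorem sum_map_range_int (f : Nat → Int) (k : Nat) :
    ((List.range k).map f).sum = ∑ i ∈ Finset.range k, f i := by
  induction k with
  | zero => simp
  | succ m ih =>
    rw [List.range_succ, List.map_append, List.sum_append, ih, Finset.sum_range_succ]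
    simp

theorem map_range_getD (nums : List Int) (k : Nat) (hk : k ≤ nums.length) :
    (List.range k).map (fun i => nums.getD i 0) = nums.take k := by
  induction k with
  | zero => simp
  | succ m ih =>
    rw [List.range_succ, List.map_append, ih (by omega), List.take_add_one]
    simp [List.getD, List.getElem?_eq_getElem (by omega : m < nums.length)]

-- B's initial sum over nums[:window] is the first window sum
theorem take_sum_eq (nums : List Int) (k : Nat) (hk : k ≤ nums.length) :
    (nums.take k).sum = pvF nums k 0 := by
  rw [← map_range_getD nums k hk]
  unfold pvF pvG
  rw [← sum_map_range_int]
  simp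

-- invariant of B's loop: after m steps the running sum is pvF m and the output lists all window sums so far
theorem loop_inv (nums : List Int) (k : Nat) (m : Nat) :
    (List.range m).foldl
      (fun (st : Int × List Int) (i : Nat) =>
        let s := st.1 + PySem.List.pyGetD nums ((k : Int) + (i : Int)) 0
                      - PySem.List.pyGetD nums (((k : Int) + (i : Int)) - (k : Int)) 0
        (s, st.2 ++ [s]))
      (pvF nums k 0, [pvF nums k 0])
    = (pvF nums k m, (List.range (m + 1)).map (fun t => pvF nums k t)) := by
  induction m with
  | zero => simp
  | succ m ih =>
    rw [List.range_succ, List.foldl_append, ih]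
    simp only [List.foldl_cons, List.foldl_nil]
    have h1 : (k : Int) + (m : Int) = ((k + m : Nat) : Int) := by omega
    have h2 : ((k : Int) + (m : Int)) - (k : Int) = ((m : Nat) : Int) := by omega
    rw [h2, h1, PySem.List.pyGetD_natCast, PySem.List.pyGetD_natCast]
    have hs : pvF nums k m + nums.getD (k + m) 0 - nums.getD m 0 = pvF nums k (m + 1) := by
      rw [pvF_slide]; unfold pvG; rw [Nat.add_comm m k]
    rw [hs, List.range_succ (n := m + 1), List.map_append]
    simp

theorem B_eq_map (nums : List Int) (k : Nat) (hk : k ≤ nums.length) :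
    sumOfAllSubarray_alt nums (k : Int) =
      (List.range (nums.length - k + 1)).map (fun t => pvF nums k t) := by
  unfold sumOfAllSubarray_alt
  rw [if_neg (by omega)]
  simp only [PySem.List.slice_to_natCast]
  rw [take_sum_eq nums k hk, PySem.List.pyRange_one, List.foldl_map]
  have hlen : (((nums.length : Int)) - (k : Int)).toNat = nums.length - k := by omega
  rw [hlen, loop_inv nums k (nums.length - k)]

-- ===== VERDICT (by name: the statement is the Claim_ definition above) =====
theorem sumOfAllSubarray_spec : Claim_unchanged_sumOfAllSubarray := by
  intro nums window _ hD
  unfold D_sumOfAllSubarray at hD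
  have hw : window = ((window.toNat : Nat) : Int) := by omega
  rw [hw]
  set k := window.toNat with hk
  by_cases hle : k ≤ nums.length
  · rw [A_eq_map nums k hle, B_eq_map nums k hle]
  · have hA : sumOfAllSubarray nums (k : Int) = [] := by
      unfold sumOfAllSubarray
      rw [PySem.List.pyRange_one_eq_nil (by omega)]
      rfl
    have hB : sumOfAllSubarray_alt nums (k : Int) = [] := by
      unfold sumOfAllSubarray_alt
      rw [if_pos (Or.inr (by omega))]
    rw [hA, hB]

theorem sumOfAllSubarray_changed : Claim_changed_sumOfAllSubarray := by
  unfold Claim_changed_sumOfAllSubarray; decide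

theorem sumOfAllSubarray_tight : Claim_exact_sumOfAllSubarray := by
  intro nums window _ hD
  unfold D_sumOfAllSubarray at hD
  have hB : sumOfAllSubarray_alt nums window = [] := by
    unfold sumOfAllSubarray_alt
    rw [if_pos (Or.inl hD)]
  rw [hB]
  unfold sumOfAllSubarray
  rw [PySem.List.foldl_append_singleton_eq_map]
  rw [PySem.List.pyRange_one_cons (by omega)]
  simp
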